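-- pv_equiv track=rewrite | github.com/bigbob004/yandex-algos-training | 2nd_homework/F. Симметричная последовательность/main.py | analys_of_sequence
-- ===== SOURCE A (Python) =====
-- def analys_of_sequence(lst, N):
--     answer = []
--     for start in range(N):
--         i = start
--         j = N - 1
--         while i <= j and lst[i] == lst[j]:
--             i += 1
--             j -= 1
--         if i > j:
--             for q in range(start - 1, -1, -1):
--                 answer.append(lst[q])
--             return answer
-- ===== SOURCE B (Python) =====
-- def analys_of_sequence(lst, N):
--     if N <= 0:
--         return None
--     r = lst[:N][::-1]
--     start = 0
--     while lst[start:N] != r[:N - start]: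
--         start += 1
--     return r[N - start:]
-- ===== Notes on version B (the rewrite author's own statement) =====
-- stated objective: alternative
-- what changed: B replaces A's two-pointer index scan per start and element-by-element reversed-prefix building with one reversed copy of the prefix: the split point is found by comparing whole slices lst[start:N] against r[:N-start] and the answer is returned directly as the slice r[N-start:].
import Mathlib
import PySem

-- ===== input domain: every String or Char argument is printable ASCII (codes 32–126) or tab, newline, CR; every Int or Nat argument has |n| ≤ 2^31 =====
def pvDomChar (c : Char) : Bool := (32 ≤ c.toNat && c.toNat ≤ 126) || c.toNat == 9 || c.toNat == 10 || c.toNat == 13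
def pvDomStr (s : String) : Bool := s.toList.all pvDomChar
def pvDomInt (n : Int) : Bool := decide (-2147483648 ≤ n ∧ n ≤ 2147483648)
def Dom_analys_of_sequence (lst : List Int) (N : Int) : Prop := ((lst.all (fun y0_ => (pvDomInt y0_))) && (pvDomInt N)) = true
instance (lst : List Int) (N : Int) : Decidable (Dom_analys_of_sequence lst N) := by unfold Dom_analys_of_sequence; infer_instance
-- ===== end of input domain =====

-- B finds the split point by comparing whole slices against one reversed copy of the prefix and
-- returns a slice of that copy, instead of A's per-start two-pointer index scan and
-- element-by-element building of the reversed prefix (objective: alternative, same worst-case cost).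

-- ===== PORT A =====
-- inner 'while i <= j and lst[i] == lst[j]': returns the final (i, j); none = IndexError
def pvAWhile (lst : List Int) (i j : Int) : Option (Int × Int) :=
  if _h : i ≤ j then
    match PySem.List.pyGet? lst i, PySem.List.pyGet? lst j with
    | some a, some b => if a == b then pvAWhile lst (i + 1) (j - 1) else some (i, j)
    | _, _ => none
  else some (i, j)
termination_by (j - i + 2).toNat
decreasing_by omega

-- 'for q in range(start - 1, -1, -1): answer.append(lst[q])'; none = IndexError
def pvABuild (lst : List Int) (start : Int) : Option (List Int) :=
  (PySem.List.pyRange (start - 1) (-1) (-1)).foldl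
    (fun acc q =>
      match acc, PySem.List.pyGet? lst q with
      | some l, some v => some (l ++ [v])
      | _, _ => none)
    (some [])

-- 'for start in range(N)', with the early return
def pvAOuter (lst : List Int) (N : Int) : List Int → Option (List Int)
  | [] => none
  | start :: rest =>
    match pvAWhile lst start (N - 1) with
    | none => none
    | some (i, j) => if i > j then pvABuild lst start else pvAOuter lst N rest

def analys_of_sequence (lst : List Int) (N : Int) : Option (List Int) :=
  pvAOuter lst N (PySem.List.pyRange 0 N 1)

-- ===== PORT B =====
-- 'while lst[start:N] != r[:N-start]: start += 1' then 'return r[N-start:]'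
-- (the fuel only makes the loop total in Lean; with the top call's fuel it is never exhausted under Pre_)
def pvBGo (lst r : List Int) (N : Int) : Nat → Int → List Int
  | 0, start => PySem.List.slice r (some (N - start)) none
  | fuel + 1, start =>
    if PySem.List.slice lst (some start) (some N) ≠ PySem.List.slice r none (some (N - start)) then
      pvBGo lst r N fuel (start + 1)
    else
      PySem.List.slice r (some (N - start)) none

def analys_of_sequence_alt (lst : List Int) (N : Int) : Option (List Int) :=
  if N ≤ 0 then none
  else
    some (pvBGo lst ((PySem.List.slice lst none (some N)).reverse) N N.toNat 0)

-- ===== PRECONDITION & SPEC =====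
-- Pre_ excludes exactly the inputs where A raises IndexError: a positive N larger than len(lst)
def Pre_analys_of_sequence (lst : List Int) (N : Int) : Prop := 0 < N → N ≤ (lst.length : Int)
instance (lst : List Int) (N : Int) : Decidable (Pre_analys_of_sequence lst N) := by
  unfold Pre_analys_of_sequence; infer_instance

def pvWitness_analys_of_sequence : List Int × Int := ([1, 2, 1], 3)

def Spec_analys_of_sequence (lst : List Int) (N : Int) (out : Option (List Int)) : Prop := out = analys_of_sequence_alt lst N
instance (lst : List Int) (N : Int) (out : Option (List Int)) : Decidable (Spec_analys_of_sequence lst N out) := by unfold Spec_analys_of_sequence; infer_instance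

-- ===== CLAIM (what is proved, stated in full; the proofs are below) =====
def Claim_equal_analys_of_sequence : Prop := ∀ (lst : List Int) (N : Int), Dom_analys_of_sequence lst N → Pre_analys_of_sequence lst N → Spec_analys_of_sequence lst N (analys_of_sequence lst N)

-- ===== LEMMAS AND PROOFS =====

-- the segment lst[i:j+1] as a Lean list
def pvSeg (lst : List Int) (i j : Int) : List Int :=
  (lst.drop i.toNat).take (j + 1 - i).toNat

lemma pvSeg_nil (lst : List Int) (i j : Int) (h : j < i) : pvSeg lst i j = [] := by
  have : (j + 1 - i).toNat = 0 := by omega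
  simp [pvSeg, this]

lemma pvSeg_single (lst : List Int) (i : Int) (h0 : 0 ≤ i) (h : i < (lst.length : Int)) :
    pvSeg lst i i = [lst[i.toNat]] := by
  have hlt : i.toNat < lst.length := by omega
  have h1 : (i + 1 - i).toNat = 1 := by omega
  rw [pvSeg, h1, List.drop_eq_getElem_cons hlt]
  rfl

lemma pvSeg_decomp (lst : List Int) (i j : Int) (h0 : 0 ≤ i) (hij : i < j)
    (hj : j < (lst.length : Int)) :
    pvSeg lst i j = lst[i.toNat]'(by omega) :: (pvSeg lst (i + 1) (j - 1) ++ [lst[j.toNat]'(by omega)]) := by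
  have hi : i.toNat < lst.length := by omega
  have ht : (j + 1 - i).toNat = ((j - 1) + 1 - (i + 1)).toNat + 1 + 1 := by omega
  rw [pvSeg, List.drop_eq_getElem_cons hi, ht]
  rw [List.take_succ_cons]
  congr 1
  rw [pvSeg]
  set t := ((j - 1) + 1 - (i + 1)).toNat with hT
  have hidx : (lst.drop (i.toNat + 1))[t]? = some (lst[j.toNat]'(by omega)) := by
    rw [List.getElem?_drop]
    have : i.toNat + 1 + t = j.toNat := by omega
    rw [this, List.getElem?_eq_getElem (by omega)]
  have hdrop : (i+1).toNat = i.toNat + 1 := by omega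
  rw [hdrop, List.take_add_one, hidx]
  simp

lemma pal_short (l : List Int) (h : l.length ≤ 1) : l = l.reverse := by
  match l, h with
  | [], _ => rfl
  | [x], _ => rfl

lemma pal_cons_concat (x y : Int) (m : List Int) :
    (x :: m ++ [y] = (x :: m ++ [y]).reverse) ↔ (x = y ∧ m = m.reverse) := by
  rw [show (x :: m ++ [y]).reverse = y :: (m.reverse ++ [x]) by simp]
  constructor
  · intro h
    injection h with h1 h2
    subst h1
    exact ⟨rfl, (List.append_left_inj [x]).mp h2⟩
  · rintro ⟨rfl, hm⟩
    nth_rewrite 1 [hm]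
    rfl

-- A's inner while loop decides palindromicity of pvSeg lst i j
lemma pvAWhile_spec (lst : List Int) (i j : Int) (hi : 0 ≤ i) (hj : j < (lst.length : Int)) :
    ∃ p : Int × Int, pvAWhile lst i j = some p ∧
      ((p.2 < p.1) ↔ pvSeg lst i j = (pvSeg lst i j).reverse) := by
  rw [pvAWhile]
  split_ifs with hij
  · have higet : PySem.List.pyGet? lst i = some (lst[i.toNat]'(by omega)) := by
      apply PySem.List.pyGet?_eq_some_getElem <;> omega
    have hjget : PySem.List.pyGet? lst j = some (lst[j.toNat]'(by omega)) := by
      apply PySem.List.pyGet?_eq_some_getElem <;> omega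
    rw [higet, hjget]
    simp only []
    by_cases heq : lst[i.toNat]'(by omega) = lst[j.toNat]'(by omega)
    · rw [if_pos (by simpa using heq)]
      rcases lt_or_eq_of_le hij with hlt | hEq
      · obtain ⟨p, hrun, hiff⟩ := pvAWhile_spec lst (i + 1) (j - 1) (by omega) (by omega)
        refine ⟨p, hrun, ?_⟩
        rw [pvSeg_decomp lst i j hi hlt hj, hiff]
        constructor
        · intro h
          exact (pal_cons_concat _ _ _).mpr ⟨heq, h⟩
        · intro h
          exact ((pal_cons_concat _ _ _).mp h).2
      · subst hEq
        rw [pvAWhile, dif_neg (by omega : ¬ (i + 1 ≤ i - 1))]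
        refine ⟨(i + 1, i - 1), rfl, ?_⟩
        have hs := pvSeg_single lst i hi hj
        constructor
        · intro _
          rw [hs]
          rfl
        · intro _
          show i - 1 < i + 1
          omega
    · rw [if_neg (by simpa using heq)]
      refine ⟨(i, j), rfl, ?_⟩
      have hlt : i < j := by
        rcases lt_or_eq_of_le hij with h | h
        · exact h
        · exact absurd (by simp [h]) heq
      rw [pvSeg_decomp lst i j hi hlt hj]
      constructor
      · intro h
        exact absurd h (by simp; omega)
      · intro h
        exact absurd ((pal_cons_concat _ _ _).mp h).1 heq
  · exact ⟨(i, j), rfl, by simp [pvSeg_nil lst i j (by omega)]; omega⟩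
termination_by (j - i + 2).toNat
decreasing_by omega

-- A's answer-building loop, from any accumulator
lemma pvABuild_go (lst : List Int) (t : Int) (acc : List Int)
    (h : t < (lst.length : Int)) :
    (PySem.List.pyRange t (-1) (-1)).foldl
      (fun acc q =>
        match acc, PySem.List.pyGet? lst q with
        | some l, some v => some (l ++ [v])
        | _, _ => none)
      (some acc) = some (acc ++ (lst.take (t + 1).toNat).reverse) := by
  by_cases ht : t ≤ -1
  · rw [PySem.List.pyRange_neg_one_eq_nil ht]
    have : (t + 1).toNat = 0 := by omega
    simp [this]
  · have h0 : 0 ≤ t := by omega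
    rw [PySem.List.pyRange_neg_one_cons (by omega : (-1 : Int) < t)]
    have hget : PySem.List.pyGet? lst t = some (lst[t.toNat]'(by omega)) := by
      apply PySem.List.pyGet?_eq_some_getElem <;> omega
    rw [List.foldl_cons, hget]
    simp only []
    rw [pvABuild_go lst (t - 1) (acc ++ [lst[t.toNat]'(by omega)]) (by omega)]
    have htk : (t - 1 + 1).toNat = t.toNat := by omega
    have htake : List.take (t.toNat + 1) lst = List.take t.toNat lst ++ [lst[t.toNat]'(by omega)] := by
      rw [List.take_add_one, List.getElem?_eq_getElem (by omega : t.toNat < lst.length)]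
      rfl
    have ht1 : (t + 1).toNat = t.toNat + 1 := by omega
    rw [htk, ht1, htake, List.reverse_append, List.reverse_singleton, List.append_assoc]
termination_by (t + 2).toNat
decreasing_by omega

-- A's answer-building loop produces the reversed prefix
lemma pvABuild_spec (lst : List Int) (start : Int)
    (hle : start ≤ (lst.length : Int)) :
    pvABuild lst start = some ((lst.take start.toNat).reverse) := by
  rw [pvABuild, pvABuild_go lst (start - 1) [] (by omega)]
  have : (start - 1 + 1).toNat = start.toNat := by omega
  rw [this, List.nil_append]

-- lst[start:N] = (lst.take N.toNat).drop start.toNat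
lemma pvSliceA (lst : List Int) (start N : Int) (h0 : 0 ≤ start) (hN : 0 ≤ N) :
    PySem.List.slice lst (some start) (some N) = (lst.take N.toNat).drop start.toNat := by
  rw [PySem.List.slice_toNat lst h0 hN, List.drop_take]

-- r[:N-start] = reverse of that segment (r = reverse of the prefix)
lemma pvSliceB (lst : List Int) (start N : Int) (h0 : 0 ≤ start) (hsN : start ≤ N)
    (hN : N ≤ (lst.length : Int)) :
    PySem.List.slice ((lst.take N.toNat).reverse) none (some (N - start)) =
      ((lst.take N.toNat).drop start.toNat).reverse := by
  rw [PySem.List.slice_to _ (by omega : (0:Int) ≤ N - start), List.take_reverse]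
  congr 2
  have hlen : (lst.take N.toNat).length = N.toNat := by
    rw [List.length_take]
    omega
  rw [hlen]
  omega

-- r[N-start:] = reversed prefix lst[:start]
lemma pvSliceC (lst : List Int) (start N : Int) (h0 : 0 ≤ start) (hsN : start ≤ N)
    (hN : N ≤ (lst.length : Int)) :
    PySem.List.slice ((lst.take N.toNat).reverse) (some (N - start)) none =
      (lst.take start.toNat).reverse := by
  rw [PySem.List.slice_from _ (by omega : (0:Int) ≤ N - start), List.drop_reverse]
  congr 1
  have hlen : (lst.take N.toNat).length = N.toNat := by
    rw [List.length_take]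
    omega
  rw [List.take_take, hlen]
  congr 1
  omega

lemma pvSeg_eq (lst : List Int) (start N : Int) (h0 : 0 ≤ start) :
    pvSeg lst start (N - 1) = (lst.take N.toNat).drop start.toNat := by
  rw [pvSeg, List.drop_take]
  congr 1
  omega

-- the two loops agree from every reachable state
lemma pvLoops_agree (lst : List Int) (N : Int) (hN : N ≤ (lst.length : Int)) :
    ∀ (fuel : Nat) (start : Int), 0 ≤ start → start < N → (N - start).toNat ≤ fuel →
      pvAOuter lst N (PySem.List.pyRange start N 1) =
        some (pvBGo lst ((lst.take N.toNat).reverse) N fuel start) := by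
  intro fuel
  induction fuel with
  | zero =>
    intro start h0 hsN hfuel
    omega
  | succ f ih =>
    intro start h0 hsN hfuel
    rw [PySem.List.pyRange_one_cons hsN]
    obtain ⟨p, hrun, hiff⟩ := pvAWhile_spec lst start (N - 1) h0 (by omega)
    obtain ⟨pi, pj⟩ := p
    rw [pvSeg_eq lst start N h0] at hiff
    show (match pvAWhile lst start (N - 1) with
      | none => none
      | some (i, j) => if i > j then pvABuild lst start else pvAOuter lst N (PySem.List.pyRange (start + 1) N 1)) = _
    rw [hrun]
    simp only []
    rw [pvBGo]
    by_cases hpal : (lst.take N.toNat).drop start.toNat = ((lst.take N.toNat).drop start.toNat).reverse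
    · rw [if_pos (hiff.mpr hpal), pvABuild_spec lst start (by omega)]
      rw [if_neg (by
        rw [pvSliceA lst start N h0 (by omega), pvSliceB lst start N h0 (by omega) hN]
        simpa using hpal)]
      rw [pvSliceC lst start N h0 (by omega) hN]
    · have hne : start + 1 < N := by
        rcases lt_or_eq_of_le (by omega : start + 1 ≤ N) with h | h
        · exact h
        · exfalso
          apply hpal
          apply pal_short
          rw [List.length_drop, List.length_take]
          omega
      rw [if_neg (by intro hc; exact hpal (hiff.mp hc))]
      rw [if_pos (by
        rw [pvSliceA lst start N h0 (by omega), pvSliceB lst start N h0 (by omega) hN]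
        simpa using hpal)]
      exact ih (start + 1) (by omega) hne (by omega)

-- ===== VERDICT (by name: the statement is the Claim_ definition above) =====
theorem analys_of_sequence_spec : Claim_equal_analys_of_sequence := by
  intro lst N _ hpre
  unfold Spec_analys_of_sequence
  by_cases hN : N ≤ 0
  · rw [analys_of_sequence, analys_of_sequence_alt, PySem.List.pyRange_one_eq_nil hN, if_pos hN]
    rfl
  · have hlen := hpre (by omega)
    rw [analys_of_sequence, analys_of_sequence_alt, if_neg hN,
      PySem.List.slice_to lst (by omega : (0:Int) ≤ N)]
    exact pvLoops_agree lst N hlen N.toNat 0 le_rfl (by omega) (by omega)
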